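-- pv_equiv track=rewrite | github.com/Suah-Cho/Algorithm | 프로그래머스/1/133499. 옹알이 （2）/옹알이 （2）.py | solution
-- ===== SOURCE A (Python) =====
-- def solution(babbling):
--     answer = 0
--     # 가능한 발음
--     words = ["aya", "ye", "woo", "ma"]
--
--     for word in babbling:
--         # 비교 단어
--         comp = ""
--         # 현재 단어
--         temp = ""
--
--         for w in word:
--             temp += w
--
--             # 연속 발음 불가
--             if temp == comp:
--                 break
--
--             # 발음되는 경우 -> 현재 temp를 comp에 저장 (이후 연속 발음인지 확인하기 위해)
--             if temp in words:
--                 comp = temp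
--                 temp = ""
--
--         # 더 이상 확인할 글자가 없는 경우 모두 발음이 되는 것 -> answer += 1
--         if temp == "":
--             answer += 1
--
--     return answer
-- ===== SOURCE B (Python) =====
-- def _ok(s):
--     # Word-at-a-time greedy match: the four words start with distinct letters,
--     # so at most one can match at any position; a word may not repeat back-to-back.
--     prev = ""
--     while s != "":
--         if s.startswith("aya") and prev != "aya":
--             prev = "aya"
--             s = s[3:]
--         elif s.startswith("ye") and prev != "ye":
--             prev = "ye"
--             s = s[2:]
--         elif s.startswith("woo") and prev != "woo":
--             prev = "woo"
--             s = s[3:]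
--         elif s.startswith("ma") and prev != "ma":
--             prev = "ma"
--             s = s[2:]
--         else:
--             return False
--     return True
--
--
-- def solution(babbling):
--     answer = 0
--     for word in babbling:
--         if _ok(word):
--             answer += 1
--     return answer
-- ===== Notes on version B (the rewrite author's own statement) =====
-- stated objective: alternative
-- what changed: Replaces A's character-by-character accumulator parse (temp/comp strings with a break on repeat) by a word-at-a-time greedy matcher that tests each allowed word with startswith and jumps by the word's length, tracking only the previous word.
import Mathlib
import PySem

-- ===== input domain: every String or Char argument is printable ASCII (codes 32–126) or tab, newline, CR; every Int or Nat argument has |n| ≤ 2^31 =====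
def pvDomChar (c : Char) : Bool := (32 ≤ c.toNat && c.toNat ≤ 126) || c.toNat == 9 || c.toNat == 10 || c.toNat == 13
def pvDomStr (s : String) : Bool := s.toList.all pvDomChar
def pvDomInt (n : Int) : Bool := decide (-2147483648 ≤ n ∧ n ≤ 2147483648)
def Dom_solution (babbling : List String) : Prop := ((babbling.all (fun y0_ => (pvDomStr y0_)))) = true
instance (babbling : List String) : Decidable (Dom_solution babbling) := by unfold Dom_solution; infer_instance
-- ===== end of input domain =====

-- B replaces A's char-by-char accumulator parse with a word-at-a-time greedy matcher (alternative structure, same cost).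

def AYA : List Char := ['a', 'y', 'a']
def YE : List Char := ['y', 'e']
def WOO : List Char := ['w', 'o', 'o']
def MA : List Char := ['m', 'a']

-- ===== PORT A =====
-- words = ["aya", "ye", "woo", "ma"]  (strings modelled as lists of chars)
def WORDS : List (List Char) := [AYA, YE, WOO, MA]

-- A's inner loop over the characters of one word; returns the final `temp`
-- (on `break`, `temp` is returned as it stands, exactly as in A).
def innerA : List Char → List Char → List Char → List Char
  | [], _comp, temp => temp
  | c :: cs, comp, temp =>
    let t := temp ++ [c]
    if t = comp then t
    else if t ∈ WORDS then innerA cs t []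
    else innerA cs comp t

def solution (babbling : List String) : Int :=
  babbling.foldl (fun answer word =>
    if innerA word.toList [] [] = [] then answer + 1 else answer) 0

-- ===== PORT B =====
-- Source B's `_ok`: while-loop with startswith tests, transcribed as recursion on the list.
def okB (prev s : List Char) : Bool :=
  if _h : s = [] then true
  else if AYA.isPrefixOf s && prev != AYA then okB AYA (s.drop 3)
  else if YE.isPrefixOf s && prev != YE then okB YE (s.drop 2)
  else if WOO.isPrefixOf s && prev != WOO then okB WOO (s.drop 3)
  else if MA.isPrefixOf s && prev != MA then okB MA (s.drop 2)
  else false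
termination_by s.length
decreasing_by all_goals (cases s with
  | nil => simp_all
  | cons c cs => simp [List.length_drop])

def solution_alt (babbling : List String) : Int :=
  babbling.foldl (fun answer word =>
    if okB [] word.toList then answer + 1 else answer) 0

-- ===== PRECONDITION & SPEC =====
def Spec_solution (babbling : List String) (out : Int) : Prop := out = solution_alt babbling
instance (babbling : List String) (out : Int) : Decidable (Spec_solution babbling out) := by unfold Spec_solution; infer_instance

-- ===== CLAIM (what is proved, stated in full; the proofs are below) =====
def Claim_equal_solution : Prop := ∀ (babbling : List String), Dom_solution babbling → Spec_solution babbling (solution babbling)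

-- ===== LEMMAS AND PROOFS =====

-- the possible values of `comp` during A's inner loop
def CANDS : List (List Char) := [] :: WORDS

-- a `temp` from which A can never recover: nonempty and not a prefix of any word
def Dead (t : List Char) : Prop := t ≠ [] ∧ ∀ w ∈ WORDS, ¬ t <+: w

lemma dead_snoc (t : List Char) (c : Char) (h : Dead t) : Dead (t ++ [c]) :=
  ⟨by simp, fun w hw hp => h.2 w hw ((List.prefix_append t [c]).trans hp)⟩

lemma innerA_dead : ∀ (cs : List Char) (comp t : List Char), Dead t → innerA cs comp t ≠ [] := by
  intro cs
  induction cs with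
  | nil => intro comp t h; exact h.1
  | cons c cs ih =>
    intro comp t h
    have hd := dead_snoc t c h
    simp only [innerA]
    split
    · exact hd.1
    · split
      · exact absurd (List.prefix_refl _) (hd.2 _ (by assumption))
      · exact ih _ _ hd

lemma innerA_mid (c : Char) (cs comp t : List Char) (hcomp : comp ∈ CANDS)
    (ht : t ++ [c] ∉ CANDS) :
    innerA (c :: cs) comp t = innerA cs comp (t ++ [c]) := by
  simp only [innerA]
  rw [if_neg (show ¬ t ++ [c] = comp from fun he => ht (by rw [he]; exact hcomp)),
    if_neg (show ¬ t ++ [c] ∈ WORDS from fun hm => ht (List.mem_cons_of_mem _ hm))]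

lemma okB_stuck (prev s : List Char) (hs : s ≠ [])
    (h1 : AYA.isPrefixOf s = false) (h2 : YE.isPrefixOf s = false)
    (h3 : WOO.isPrefixOf s = false) (h4 : MA.isPrefixOf s = false) :
    okB prev s = false := by
  rw [okB]; simp [hs, h1, h2, h3, h4]

lemma okB_word (prev w : List Char) (cs : List Char) (hw : w ∈ WORDS) :
    okB prev (w ++ cs) = if prev = w then false else okB w cs := by
  fin_cases hw <;>
    · rw [okB]
      by_cases hp : prev = ‹List Char› <;>
        simp_all [AYA, YE, WOO, MA, List.isPrefixOf, bne_iff_ne]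

-- main invariant: from an empty temp, A's inner loop succeeds iff B's matcher does
lemma main : ∀ (n : Nat) (cs : List Char), cs.length ≤ n → ∀ comp, comp ∈ CANDS →
    ((innerA cs comp [] = []) ↔ okB comp cs = true) := by
  intro n
  induction n with
  | zero =>
    intro cs h comp _
    have : cs = [] := List.eq_nil_of_length_eq_zero (Nat.le_zero.mp h)
    subst this
    simp [innerA, okB]
  | succ n ih =>
    intro cs hlen comp hc
    -- dead-end helper: temp t is dead, so A fails; B is stuck on its string, so B fails
    have deadfin : ∀ (t restA restB : List Char), Dead t → okB comp restB = false →
        ((innerA restA comp t = []) ↔ okB comp restB = true) := by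
      intro t ra rb hD hB
      rw [hB]
      simp [innerA_dead ra comp t hD]
    rcases cs with _ | ⟨c1, cs⟩
    · simp [innerA, okB]
    by_cases ha : c1 = 'a'
    · subst ha
      rw [innerA_mid _ _ _ _ hc (by decide), List.nil_append]
      rcases cs with _ | ⟨c2, cs⟩
      · rw [okB_stuck comp _ (by simp) (by decide) (by decide) (by decide) (by decide)]; simp [innerA]
      by_cases hy : c2 = 'y'
      · subst hy
        rw [innerA_mid _ _ _ _ hc (by decide)]
        simp only [List.cons_append, List.nil_append]
        rcases cs with _ | ⟨c3, cs⟩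
        · rw [okB_stuck comp _ (by simp) (by decide) (by decide) (by decide) (by decide)]; simp [innerA]
        by_cases ha3 : c3 = 'a'
        · subst ha3
          rw [show (('a':Char) :: 'y' :: 'a' :: cs) = AYA ++ cs from rfl,
            okB_word comp AYA cs (by decide)]
          simp only [innerA, List.cons_append, List.nil_append]
          by_cases hcA : comp = AYA
          · subst hcA; simp [AYA]
          · rw [if_neg (show ¬ (['a','y','a'] = comp) from fun h => hcA (by rw [← h]; rfl)),
              if_pos (show (['a','y','a'] : List Char) ∈ WORDS from by decide), if_neg hcA]
            exact ih cs (by simp at hlen; omega) AYA (by decide)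
        · -- temp ['a','y',c3] is dead
          have h3' : ¬ ('a' = c3) := fun h => ha3 h.symm
          rw [innerA_mid _ _ _ _ hc (by simp [CANDS, WORDS, AYA, YE, WOO, MA, ha3])]
          refine deadfin _ _ _ ⟨by simp, ?_⟩
              (okB_stuck _ _ (by simp)
                (by simp [AYA, List.isPrefixOf, h3'])
                (by simp [YE, List.isPrefixOf])
                (by simp [WOO, List.isPrefixOf])
                (by simp [MA, List.isPrefixOf]))
          intro w hw
          fin_cases hw <;> simp [AYA, YE, WOO, MA, List.cons_prefix_cons, ha3]
      · -- temp ['a',c2] is dead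
        have h2' : ¬ ('y' = c2) := fun h => hy h.symm
        rw [innerA_mid _ _ _ _ hc (by simp [CANDS, WORDS, AYA, YE, WOO, MA, hy])]
        refine deadfin _ _ _ ⟨by simp, ?_⟩
            (okB_stuck _ _ (by simp)
              (by simp [AYA, List.isPrefixOf, h2'])
              (by simp [YE, List.isPrefixOf])
              (by simp [WOO, List.isPrefixOf])
              (by simp [MA, List.isPrefixOf]))
        intro w hw
        fin_cases hw <;> simp [AYA, YE, WOO, MA, List.cons_prefix_cons, hy]
    · by_cases hyy : c1 = 'y'
      · subst hyy
        rw [innerA_mid _ _ _ _ hc (by decide), List.nil_append]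
        rcases cs with _ | ⟨c2, cs⟩
        · rw [okB_stuck comp _ (by simp) (by decide) (by decide) (by decide) (by decide)]; simp [innerA]
        by_cases he : c2 = 'e'
        · subst he
          rw [show (('y':Char) :: 'e' :: cs) = YE ++ cs from rfl,
            okB_word comp YE cs (by decide)]
          simp only [innerA, List.cons_append, List.nil_append]
          by_cases hcA : comp = YE
          · subst hcA; simp [YE]
          · rw [if_neg (show ¬ (['y','e'] = comp) from fun h => hcA (by rw [← h]; rfl)),
              if_pos (show (['y','e'] : List Char) ∈ WORDS from by decide), if_neg hcA]
            exact ih cs (by simp at hlen; omega) YE (by decide)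
        · have h2' : ¬ ('e' = c2) := fun h => he h.symm
          rw [innerA_mid _ _ _ _ hc (by simp [CANDS, WORDS, AYA, YE, WOO, MA, he])]
          refine deadfin _ _ _ ⟨by simp, ?_⟩
              (okB_stuck _ _ (by simp)
                (by simp [AYA, List.isPrefixOf])
                (by simp [YE, List.isPrefixOf, h2'])
                (by simp [WOO, List.isPrefixOf])
                (by simp [MA, List.isPrefixOf]))
          intro w hw
          fin_cases hw <;> simp [AYA, YE, WOO, MA, List.cons_prefix_cons, he]
      · by_cases hw1 : c1 = 'w'
        · subst hw1
          rw [innerA_mid _ _ _ _ hc (by decide), List.nil_append]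
          rcases cs with _ | ⟨c2, cs⟩
          · rw [okB_stuck comp _ (by simp) (by decide) (by decide) (by decide) (by decide)]; simp [innerA]
          by_cases ho : c2 = 'o'
          · subst ho
            rw [innerA_mid _ _ _ _ hc (by decide)]
            simp only [List.cons_append, List.nil_append]
            rcases cs with _ | ⟨c3, cs⟩
            · rw [okB_stuck comp _ (by simp) (by decide) (by decide) (by decide) (by decide)]; simp [innerA]
            by_cases ho3 : c3 = 'o'
            · subst ho3
              rw [show (('w':Char) :: 'o' :: 'o' :: cs) = WOO ++ cs from rfl,
                okB_word comp WOO cs (by decide)]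
              simp only [innerA, List.cons_append, List.nil_append]
              by_cases hcA : comp = WOO
              · subst hcA; simp [WOO]
              · rw [if_neg (show ¬ (['w','o','o'] = comp) from fun h => hcA (by rw [← h]; rfl)),
                  if_pos (show (['w','o','o'] : List Char) ∈ WORDS from by decide), if_neg hcA]
                exact ih cs (by simp at hlen; omega) WOO (by decide)
            · have h3' : ¬ ('o' = c3) := fun h => ho3 h.symm
              rw [innerA_mid _ _ _ _ hc (by simp [CANDS, WORDS, AYA, YE, WOO, MA, ho3])]
              refine deadfin _ _ _ ⟨by simp, ?_⟩
                  (okB_stuck _ _ (by simp)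
                    (by simp [AYA, List.isPrefixOf])
                    (by simp [YE, List.isPrefixOf])
                    (by simp [WOO, List.isPrefixOf, h3'])
                    (by simp [MA, List.isPrefixOf]))
              intro w hw
              fin_cases hw <;> simp [AYA, YE, WOO, MA, List.cons_prefix_cons, ho3]
          · have h2' : ¬ ('o' = c2) := fun h => ho h.symm
            rw [innerA_mid _ _ _ _ hc (by simp [CANDS, WORDS, AYA, YE, WOO, MA, ho])]
            refine deadfin _ _ _ ⟨by simp, ?_⟩
                (okB_stuck _ _ (by simp)
                  (by simp [AYA, List.isPrefixOf])
                  (by simp [YE, List.isPrefixOf])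
                  (by simp [WOO, List.isPrefixOf, h2'])
                  (by simp [MA, List.isPrefixOf]))
            intro w hw
            fin_cases hw <;> simp [AYA, YE, WOO, MA, List.cons_prefix_cons, ho]
        · by_cases hm : c1 = 'm'
          · subst hm
            rw [innerA_mid _ _ _ _ hc (by decide), List.nil_append]
            rcases cs with _ | ⟨c2, cs⟩
            · rw [okB_stuck comp _ (by simp) (by decide) (by decide) (by decide) (by decide)]; simp [innerA]
            by_cases ha2 : c2 = 'a'
            · subst ha2
              rw [show (('m':Char) :: 'a' :: cs) = MA ++ cs from rfl,
                okB_word comp MA cs (by decide)]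
              simp only [innerA, List.cons_append, List.nil_append]
              by_cases hcA : comp = MA
              · subst hcA; simp [MA]
              · rw [if_neg (show ¬ (['m','a'] = comp) from fun h => hcA (by rw [← h]; rfl)),
                  if_pos (show (['m','a'] : List Char) ∈ WORDS from by decide), if_neg hcA]
                exact ih cs (by simp at hlen; omega) MA (by decide)
            · have h2' : ¬ ('a' = c2) := fun h => ha2 h.symm
              rw [innerA_mid _ _ _ _ hc (by simp [CANDS, WORDS, AYA, YE, WOO, MA, ha2])]
              refine deadfin _ _ _ ⟨by simp, ?_⟩
                  (okB_stuck _ _ (by simp)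
                    (by simp [AYA, List.isPrefixOf])
                    (by simp [YE, List.isPrefixOf])
                    (by simp [WOO, List.isPrefixOf])
                    (by simp [MA, List.isPrefixOf, h2']))
              intro w hw
              fin_cases hw <;> simp [AYA, YE, WOO, MA, List.cons_prefix_cons, ha2]
          · -- first char matches no word
            have ha' : ¬ ('a' = c1) := fun h => ha h.symm
            have hy' : ¬ ('y' = c1) := fun h => hyy h.symm
            have hw' : ¬ ('w' = c1) := fun h => hw1 h.symm
            have hm' : ¬ ('m' = c1) := fun h => hm h.symm
            rw [innerA_mid _ _ _ _ hc (by simp [CANDS, WORDS, AYA, YE, WOO, MA, ha, hyy, hw1, hm]), List.nil_append]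
            refine deadfin _ _ _ ⟨by simp, ?_⟩
                (okB_stuck _ _ (by simp)
                  (by simp [AYA, List.isPrefixOf, beq_iff_eq, ha'])
                  (by simp [YE, List.isPrefixOf, beq_iff_eq, hy'])
                  (by simp [WOO, List.isPrefixOf, beq_iff_eq, hw'])
                  (by simp [MA, List.isPrefixOf, beq_iff_eq, hm']))
            intro w hw
            fin_cases hw <;> simp [AYA, YE, WOO, MA, List.cons_prefix_cons, ha, hyy, hw1, hm]

lemma fold_eq : ∀ (l : List String) (a : Int),
    l.foldl (fun answer word => if innerA word.toList [] [] = [] then answer + 1 else answer) a =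
    l.foldl (fun answer word => if okB [] word.toList then answer + 1 else answer) a := by
  intro l
  induction l with
  | nil => intro a; rfl
  | cons s l ih =>
    intro a
    simp only [List.foldl_cons]
    rw [show (if innerA s.toList [] [] = [] then a + 1 else a) =
        (if okB [] s.toList then a + 1 else a) from by
      by_cases h : okB [] s.toList = true
      · rw [if_pos ((main s.toList.length s.toList le_rfl [] (by decide)).mpr h), if_pos h]
      · rw [if_neg (fun he => h ((main s.toList.length s.toList le_rfl [] (by decide)).mp he)),
          if_neg (by simpa using h)], ih]

-- ===== VERDICT (by name: the statement is the Claim_ definition above) =====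
theorem solution_spec : Claim_equal_solution := by
  intro babbling _
  unfold Spec_solution solution solution_alt
  exact fold_eq babbling 0
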